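-- pv_equiv track=rewrite | github.com/mysticflounder/modular-schur | scripts/phase9_stable_tables.py | predicted_m108t_d18
-- ===== SOURCE A (Python) =====
-- import math
--
-- def prime_factorization(n: int) -> dict[int, int]:
--     factors: dict[int, int] = {}
--     candidate = 2
--     while candidate * candidate <= n:
--         while n % candidate == 0:
--             factors[candidate] = factors.get(candidate, 0) + 1
--             n //= candidate
--         candidate += 1 if candidate == 2 else 2
--     if n > 1:
--         factors[n] = factors.get(n, 0) + 1
--     return factors
--
-- def remove_prime_power(value: int, prime: int) -> int:
--     while value % prime == 0:
--         value //= prime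
--     return value
--
-- def predicted_m108t_d18(t: int) -> tuple[int, int, list[int]]:
--     factors = prime_factorization(t)
--     beta = factors.get(3, 0)
--     three_layers = 0 if beta == 0 else 6 + 18 * (beta - 1)
--     predicted_sigma = math.ceil((6 * t - 1) / 4)
--     predicted_k0 = (
--         4
--         + 2 * factors.get(2, 0)
--         + three_layers
--         + sum(
--             exp * (prime - 1)
--             for prime, exp in factors.items()
--             if prime not in (2, 3)
--         )
--     )
--
--     three_free_part = remove_prime_power(t, 3)
--     if three_free_part in (1, 2, 4, 5):
--         expected: list[int] = []
--     elif beta == 0: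
--         expected = [t, 5 * t]
--     else:
--         expected = [t, 7 * t // 3, 11 * t // 3, 5 * t]
--     return predicted_sigma, predicted_k0, expected
-- ===== SOURCE B (Python) =====
-- def predicted_m108t_d18(t):
--     # B: factor t into a flat ascending list of prime factors by recursively
--     # peeling off the smallest prime factor, then derive everything by counting
--     # passes over that list (no exponent dict, no fused candidate loop).
--
--     def smallest_factor(n):
--         # smallest divisor >= 2 of n (n itself when n is prime); n >= 2
--         c = 2
--         while c * c <= n:
--             if n % c == 0:
--                 return c
--             c += 1 if c == 2 else 2
--         return n
--
--     def factor_list(n):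
--         # ascending multiset of prime factors; empty for n <= 1
--         if n <= 1:
--             return []
--         d = smallest_factor(n)
--         return [d] + factor_list(n // d)
--
--     ps = factor_list(t)
--     beta = ps.count(3)
--     three_layers = 0 if beta == 0 else 6 + 18 * (beta - 1)
--     predicted_sigma = -((1 - 6 * t) // 4)  # exact integer ceil((6*t-1)/4)
--     predicted_k0 = 4 + 2 * ps.count(2) + three_layers + sum(p - 1 for p in ps if p > 3)
--
--     three_free_part = t
--     while three_free_part % 3 == 0:
--         three_free_part //= 3
--     if three_free_part in (1, 2, 4, 5):
--         expected = []
--     elif beta == 0: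
--         expected = [t, 5 * t]
--     else:
--         expected = [t, 7 * t // 3, 11 * t // 3, 5 * t]
--     return predicted_sigma, predicted_k0, expected
-- ===== Notes on version B (the rewrite author's own statement) =====
-- stated objective: alternative
-- what changed: A builds an exponent dict by a nested candidate sweep (inner loop divides out each candidate fully) and then reads it back via .get lookups and a filtered sum over .items; B instead factors t into a flat ascending list of prime factors by recursively peeling off the smallest prime factor (a separate smallest_factor search restarted from 2 for each factor) and derives beta, the 2-exponent and the odd-prime sum by counting passes over that list, with the sigma ceiling done in exact integer arithmetic.
import Mathlib
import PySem

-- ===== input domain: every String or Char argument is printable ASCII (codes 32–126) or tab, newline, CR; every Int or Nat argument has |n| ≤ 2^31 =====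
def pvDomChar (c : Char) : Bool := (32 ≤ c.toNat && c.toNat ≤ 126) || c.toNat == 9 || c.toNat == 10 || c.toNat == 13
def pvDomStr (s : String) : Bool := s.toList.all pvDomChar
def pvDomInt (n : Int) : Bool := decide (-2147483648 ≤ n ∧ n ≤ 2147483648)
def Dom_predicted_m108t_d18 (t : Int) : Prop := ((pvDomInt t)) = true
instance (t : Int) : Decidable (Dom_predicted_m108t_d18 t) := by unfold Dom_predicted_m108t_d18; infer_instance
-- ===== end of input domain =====

-- B replaces A's exponent dict (built by a nested candidate sweep, read back via .get and a
-- filtered sum over .items) by a recursive smallest-prime-factor peeling that yields a flat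
-- factor list, read by counting passes; objective: alternative (same cost, no dict table).

-- ===== PORT A =====
-- inner `while n % candidate == 0` of prime_factorization; fuel is a termination guard only
-- (n.natAbs steps always suffice, since each pass divides n by candidate ≥ 2)
def pvPfInner : Nat → PySem.Dict Int Int → Int → Int → PySem.Dict Int Int × Int
  | 0, d, _, n => (d, n)
  | f+1, d, c, n =>
    if PySem.Int.mod n c = 0 then
      pvPfInner f (d.insert c (d.getD c 0 + 1)) c (PySem.Int.floordiv n c)
    else (d, n)

-- outer `while candidate * candidate <= n` loop of prime_factorization (fuel guard likewise)
def pvPfOuter : Nat → PySem.Dict Int Int → Int → Int → PySem.Dict Int Int × Int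
  | 0, d, _, n => (d, n)
  | f+1, d, c, n =>
    if c * c ≤ n then
      let p := pvPfInner n.natAbs d c n
      pvPfOuter f p.1 (c + (if c = 2 then 1 else 2)) p.2
    else (d, n)

def prime_factorization (n : Int) : PySem.Dict Int Int :=
  let p := pvPfOuter (n.natAbs + 2) (PySem.Dict.empty) 2 n
  if 1 < p.2 then p.1.insert p.2 (p.1.getD p.2 0 + 1) else p.1

-- `while value % prime == 0: value //= prime` (fuel guard; at value = 0 Python loops
-- forever while this port returns — no equivalence is claimed about Python there)
def pvRpp : Nat → Int → Int → Int
  | 0, v, _ => v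
  | f+1, v, p => if PySem.Int.mod v p = 0 then pvRpp f (PySem.Int.floordiv v p) p else v

def remove_prime_power (value : Int) (prime : Int) : Int := pvRpp (value.natAbs + 1) value prime

def predicted_m108t_d18 (t : Int) : Int × Int × List Int :=
  let factors := prime_factorization t
  let beta := factors.getD 3 0
  let three_layers : Int := if beta = 0 then 0 else 6 + 18 * (beta - 1)
  -- math.ceil((6*t-1)/4): the float division is exact on Dom, so this is the exact ceiling
  let predicted_sigma := -(PySem.Int.floordiv (-(6 * t - 1)) 4)
  let predicted_k0 := 4 + 2 * factors.getD 2 0 + three_layers +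
    factors.items.foldl (fun acc pe => if ¬(pe.1 = 2 ∨ pe.1 = 3) then acc + pe.2 * (pe.1 - 1) else acc) 0
  let three_free_part := remove_prime_power t 3
  let expected : List Int :=
    if three_free_part = 1 ∨ three_free_part = 2 ∨ three_free_part = 4 ∨ three_free_part = 5 then []
    else if beta = 0 then [t, 5 * t]
    else [t, PySem.Int.floordiv (7 * t) 3, PySem.Int.floordiv (11 * t) 3, 5 * t]
  (predicted_sigma, predicted_k0, expected)

-- ===== PORT B =====
-- B's smallest_factor: scan candidates 2,3,5,… while c*c <= n (fuel is a termination guard)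
def pvSpf : Nat → Int → Int → Int
  | 0, _, n => n
  | f+1, c, n =>
    if c * c ≤ n then
      if PySem.Int.mod n c = 0 then c
      else pvSpf f (c + (if c = 2 then 1 else 2)) n
    else n

-- B's factor_list: recursively peel the smallest prime factor (fuel guard)
def pvFactor : Nat → Int → List Int
  | 0, _ => []
  | f+1, n =>
    if n ≤ 1 then []
    else
      let d := pvSpf (n.natAbs + 2) 2 n
      d :: pvFactor f (PySem.Int.floordiv n d)

-- B's `while three_free_part % 3 == 0: three_free_part //= 3` (fuel guard; loops at 0 in Python)
def pvStrip3 : Nat → Int → Int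
  | 0, m => m
  | f+1, m => if PySem.Int.mod m 3 = 0 then pvStrip3 f (PySem.Int.floordiv m 3) else m

def predicted_m108t_d18_alt (t : Int) : Int × Int × List Int :=
  let ps := pvFactor (t.natAbs + 1) t
  let beta : Int := (ps.count 3 : Int)
  let three_layers : Int := if beta = 0 then 0 else 6 + 18 * (beta - 1)
  let predicted_sigma := -(PySem.Int.floordiv (1 - 6 * t) 4)
  let predicted_k0 := 4 + 2 * (ps.count 2 : Int) + three_layers +
    ps.foldl (fun acc p => if 3 < p then acc + (p - 1) else acc) 0
  let three_free_part := pvStrip3 (t.natAbs + 1) t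
  let expected : List Int :=
    if three_free_part = 1 ∨ three_free_part = 2 ∨ three_free_part = 4 ∨ three_free_part = 5 then []
    else if beta = 0 then [t, 5 * t]
    else [t, PySem.Int.floordiv (7 * t) 3, PySem.Int.floordiv (11 * t) 3, 5 * t]
  (predicted_sigma, predicted_k0, expected)

-- ===== PRECONDITION & SPEC =====
def Spec_predicted_m108t_d18 (t : Int) (out : Int × Int × List Int) : Prop := out = predicted_m108t_d18_alt t
instance (t : Int) (out : Int × Int × List Int) : Decidable (Spec_predicted_m108t_d18 t out) := by unfold Spec_predicted_m108t_d18; infer_instance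

-- ===== CLAIM (what is proved, stated in full; the proofs are below) =====
def Claim_equal_predicted_m108t_d18 : Prop := ∀ (t : Int), Dom_predicted_m108t_d18 t → Spec_predicted_m108t_d18 t (predicted_m108t_d18 t)

-- ===== LEMMAS AND PROOFS =====

-- exponent counter (proof tool only): how many times c divides n, and the cofactor
def pvCnt : Nat → Int → Int → Int → Int × Int
  | 0, e, _, n => (e, n)
  | f+1, e, c, n =>
    if PySem.Int.mod n c = 0 then pvCnt f (e + 1) c (PySem.Int.floordiv n c) else (e, n)

-- B's filtered sum over a factor list, and A's filtered sum over the dict's items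
def pvSL (ps : List Int) : Int := ps.foldl (fun acc p => if 3 < p then acc + (p - 1) else acc) 0
def pvS (d : PySem.Dict Int Int) : Int :=
  d.items.foldl (fun acc pe => if ¬(pe.1 = 2 ∨ pe.1 = 3) then acc + pe.2 * (pe.1 - 1) else acc) 0

theorem pv_cnt_acc (f : Nat) : ∀ (e c n : Int),
    pvCnt f e c n = (e + (pvCnt f 0 c n).1, (pvCnt f 0 c n).2) := by
  induction f with
  | zero => intro e c n; simp [pvCnt]
  | succ f ih =>
    intro e c n
    by_cases h : PySem.Int.mod n c = 0
    · simp only [pvCnt, h, if_pos]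
      rw [ih (e+1), ih (0+1)]
      simp; ring_nf
    · simp [pvCnt, h]

theorem pv_cnt_nonneg (f : Nat) (c n : Int) : 0 ≤ (pvCnt f 0 c n).1 := by
  induction f generalizing n with
  | zero => simp [pvCnt]
  | succ f ih =>
    by_cases h : PySem.Int.mod n c = 0
    · simp only [pvCnt, h, if_pos]
      rw [pv_cnt_acc]
      have := ih (PySem.Int.floordiv n c)
      simp; omega
    · simp [pvCnt, h]

theorem pv_cnt_pos_mod (f : Nat) (c n : Int) (h : (pvCnt f 0 c n).1 ≠ 0) :
    PySem.Int.mod n c = 0 := by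
  by_contra hm
  cases f <;> simp [pvCnt, hm] at h

theorem pv_cnt_dvd (f : Nat) : ∀ (e c n : Int), 0 < c → (pvCnt f e c n).2 ∣ n := by
  induction f with
  | zero => intro e c n _; simp [pvCnt]
  | succ f ih =>
    intro e c n hc
    by_cases h : PySem.Int.mod n c = 0
    · simp only [pvCnt, h, if_pos]
      rcases (PySem.Int.mod_eq_zero_iff_dvd n c).mp h with ⟨k, hk⟩
      have hfd : PySem.Int.floordiv n c = k := by
        rw [PySem.Int.floordiv_eq_ediv_of_pos hc, hk,
          Int.mul_ediv_cancel_left _ (by omega : c ≠ 0)]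
      rw [hfd]
      exact dvd_trans (ih (e+1) c k hc) ⟨c, by rw [hk]; ring⟩
    · simp [pvCnt, h]

theorem pv_cnt_exits (f : Nat) : ∀ (c n : Int), 2 ≤ c → 1 ≤ n → n.natAbs ≤ f →
    PySem.Int.mod (pvCnt f 0 c n).2 c ≠ 0 ∧ 1 ≤ (pvCnt f 0 c n).2 := by
  induction f with
  | zero => intro c n _ hn hf; omega
  | succ f ih =>
    intro c n hc hn hf
    by_cases h : PySem.Int.mod n c = 0
    · simp only [pvCnt, h, if_pos]
      rw [pv_cnt_acc]
      rcases (PySem.Int.mod_eq_zero_iff_dvd n c).mp h with ⟨k, hk⟩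
      have hfd : PySem.Int.floordiv n c = k := by
        rw [PySem.Int.floordiv_eq_ediv_of_pos (by omega : (0:Int) < c), hk,
          Int.mul_ediv_cancel_left _ (by omega : c ≠ 0)]
      have hk1 : 1 ≤ k := by nlinarith
      have hkn : k < n := by nlinarith
      have := ih c k hc hk1 (by omega)
      rw [hfd]
      simpa using this
    · simp [pvCnt, h, hn]

-- A's inner loop expressed through the exponent counter
theorem pv_inner_rel (f : Nat) : ∀ (c n : Int) (d : PySem.Dict Int Int),
    pvPfInner f d c n =
      (if (pvCnt f 0 c n).1 = 0 then d else d.insert c (d.getD c 0 + (pvCnt f 0 c n).1),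
       (pvCnt f 0 c n).2) := by
  induction f with
  | zero => intro c n d; simp [pvPfInner, pvCnt]
  | succ f ih =>
    intro c n d
    by_cases h : PySem.Int.mod n c = 0
    · have hstep : pvCnt (f+1) 0 c n = pvCnt f 1 c (PySem.Int.floordiv n c) := by
        simp [pvCnt, h]
      simp only [pvPfInner, h, if_pos, hstep]
      rw [ih, pv_cnt_acc f 1]
      have hnn := pv_cnt_nonneg f c (PySem.Int.floordiv n c)
      set e0 := (pvCnt f 0 c (PySem.Int.floordiv n c)).1 with he0
      by_cases hz : e0 = 0
      · simp [hz]
      · have h1 : ¬ (1 + e0 = 0) := by omega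
        simp only [hz, if_neg, h1, not_false_eq_true]
        rw [PySem.Dict.getD_insert_self, PySem.Dict.insert_insert_self,
          show d.getD c 0 + 1 + e0 = d.getD c 0 + (1 + e0) by ring]
    · simp [pvPfInner, pvCnt, h]

theorem pvS_insert_fresh (d : PySem.Dict Int Int) (c v : Int) (h : d.contains c = false) :
    pvS (d.insert c v) = pvS d + (if ¬(c = 2 ∨ c = 3) then v * (c - 1) else 0) := by
  unfold pvS
  rw [PySem.Dict.items_insert_of_not_contains d v h, List.foldl_append]
  simp only [List.foldl_cons, List.foldl_nil]
  split <;> simp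

-- smallest-factor characterisation: under "no d in [2,c) divides n", pvSpf returns a
-- divisor ≥ 2 of n below which nothing divides n
theorem pv_spf_char (f : Nat) : ∀ (c n : Int), 2 ≤ n → 2 ≤ c → (c = 2 ∨ c % 2 = 1) →
    (∀ e : Int, 2 ≤ e → e < c → ¬ e ∣ n) → (n.natAbs : Int) + 2 ≤ (f : Int) + c →
    (pvSpf f c n ∣ n) ∧ 2 ≤ pvSpf f c n ∧
      ∀ e : Int, 2 ≤ e → e < pvSpf f c n → ¬ e ∣ n := by
  induction f with
  | zero =>
    intro c n hn hc _ hno hfc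
    simp only [pvSpf]
    refine ⟨dvd_refl n, hn, ?_⟩
    intro e he2 hen
    apply hno e he2
    omega
  | succ f ih =>
    intro c n hn hc hsh hno hfc
    by_cases hcc : c * c ≤ n
    · by_cases hdv : PySem.Int.mod n c = 0
      · simp only [pvSpf, hcc, if_pos, hdv]
        exact ⟨(PySem.Int.mod_eq_zero_iff_dvd n c).mp hdv, hc, hno⟩
      · simp only [pvSpf, hcc, if_pos, hdv, if_neg, not_false_eq_true]
        have hc' : 2 ≤ c + (if c = 2 then 1 else 2) := by split <;> omega
        have hsh' : c + (if c = 2 then 1 else 2) = 2 ∨ (c + (if c = 2 then 1 else 2)) % 2 = 1 := by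
          rcases hsh with h2 | hodd
          · subst h2; right; norm_num
          · right
            have hc2 : ¬ c = 2 := by omega
            simp only [hc2, if_neg, not_false_eq_true]
            omega
        have hno' : ∀ e : Int, 2 ≤ e → e < c + (if c = 2 then 1 else 2) → ¬ e ∣ n := by
          intro e he2 hec hedvd
          rcases hsh with h2 | hodd
          · subst h2
            simp only [if_pos] at hec
            have : e = 2 := by omega
            exact hdv ((PySem.Int.mod_eq_zero_iff_dvd n 2).mpr (this ▸ hedvd))
          · have hc2 : ¬ c = 2 := by omega
            simp only [hc2, if_neg, not_false_eq_true] at hec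
            by_cases hec' : e < c
            · exact hno e he2 hec' hedvd
            · by_cases hee : e = c
              · exact hdv ((PySem.Int.mod_eq_zero_iff_dvd n c).mpr (hee ▸ hedvd))
              · -- e = c + 1, even; 2 ∣ n follows, but 2 < c and 2 ∤ n
                have h2e : (2 : Int) ∣ e := by omega
                have h2n : (2 : Int) ∣ n := dvd_trans h2e hedvd
                have hclt : (2 : Int) < c := by omega
                exact hno 2 (by norm_num) hclt h2n
        have hfc' : (n.natAbs : Int) + 2 ≤ (f : Int) + (c + (if c = 2 then 1 else 2)) := by
          split <;> push_cast at hfc ⊢ <;> omega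
        exact ih _ _ hn hc' hsh' hno' hfc' 
    · simp only [pvSpf, hcc, if_neg, not_false_eq_true]
      refine ⟨dvd_refl n, hn, ?_⟩
      intro e he2 hen hedvd
      push_neg at hcc
      obtain ⟨k, hk⟩ := hedvd
      have hk2 : 2 ≤ k := by nlinarith
      by_cases hek : e ≤ k
      · have : e < c := by nlinarith
        exact hno e he2 this ⟨k, hk⟩
      · have hkc : k < c := by nlinarith
        exact hno k hk2 hkc ⟨e, by rw [hk]; ring⟩

-- floor division by an exact positive divisor
theorem pv_fd (c k : Int) (hc : 0 < c) : PySem.Int.floordiv (c * k) c = k := by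
  rw [PySem.Int.floordiv_eq_ediv_of_pos hc, Int.mul_ediv_cancel_left _ (by omega : c ≠ 0)]

theorem pv_cnt_zero (f : Nat) (c n : Int) (h : PySem.Int.mod n c ≠ 0) :
    pvCnt f 0 c n = (0, n) := by
  cases f <;> simp [pvCnt, h]

-- the smallest factor found by pvSpf is the least divisor ≥ 2
theorem pv_spf_least_eq (n c : Int) (hn : 2 ≤ n) (hc : 2 ≤ c) (hcd : c ∣ n)
    (hno : ∀ e : Int, 2 ≤ e → e < c → ¬ e ∣ n) : pvSpf (n.natAbs + 2) 2 n = c := by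
  obtain ⟨hdvd, h2, hleast⟩ :=
    pv_spf_char (n.natAbs + 2) 2 n hn (le_refl 2) (Or.inl rfl)
      (fun e he2 helt _ => by omega) (by push_cast; omega)
  have h1 : ¬ (pvSpf (n.natAbs + 2) 2 n < c) := fun hlt => hno _ h2 hlt hdvd
  have h2' : ¬ (c < pvSpf (n.natAbs + 2) 2 n) := fun hlt => hleast c hc hlt hcd
  omega

-- when n < c*c and nothing below c divides n, pvSpf finds n itself
theorem pv_spf_residual (n c : Int) (hn : 2 ≤ n) (hc : 2 ≤ c)
    (hno : ∀ e : Int, 2 ≤ e → e < c → ¬ e ∣ n) (hcc : n < c * c) :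
    pvSpf (n.natAbs + 2) 2 n = n := by
  obtain ⟨hdvd, h2, hleast⟩ :=
    pv_spf_char (n.natAbs + 2) 2 n hn (le_refl 2) (Or.inl rfl)
      (fun e he2 helt _ => by omega) (by push_cast; omega)
  set r := pvSpf (n.natAbs + 2) 2 n with hr
  obtain ⟨k, hk⟩ := hdvd
  have hk1 : 1 ≤ k := by nlinarith
  by_cases hk2 : k = 1
  · rw [hk, hk2, mul_one]
  · have hk2' : 2 ≤ k := by omega
    exfalso
    by_cases hrk : r ≤ k
    · have : r < c := by nlinarith
      exact hno r h2 this ⟨k, hk⟩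
    · have : k < c := by nlinarith
      exact hno k hk2' this ⟨r, by rw [hk]; ring⟩

-- fuel independence for pvFactor
theorem pv_factor_fuel (f₁ : Nat) : ∀ (f₂ : Nat) (n : Int), n.natAbs ≤ f₁ → n.natAbs ≤ f₂ →
    pvFactor f₁ n = pvFactor f₂ n := by
  induction f₁ with
  | zero =>
    intro f₂ n h1 _
    have hn : n = 0 := by omega
    subst hn
    cases f₂ <;> simp [pvFactor]
  | succ f₁ ih =>
    intro f₂ n h1 h2
    by_cases hn1 : n ≤ 1
    · cases f₂ with
      | zero =>
        have : n = 0 := by omega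
        subst this; simp [pvFactor]
      | succ f₂ => simp [pvFactor, hn1]
    · push_neg at hn1
      cases f₂ with
      | zero => omega
      | succ f₂ =>
        have hn2 : 2 ≤ n := by omega
        obtain ⟨hdvd, hd2, _⟩ :=
          pv_spf_char (n.natAbs + 2) 2 n hn2 (le_refl 2) (Or.inl rfl)
            (fun e he2 helt _ => by omega) (by push_cast; omega)
        set d := pvSpf (n.natAbs + 2) 2 n with hd
        obtain ⟨k, hk⟩ := hdvd
        have hk1 : 1 ≤ k := by nlinarith
        have hkn : k < n := by nlinarith
        have hfd : PySem.Int.floordiv n d = k := by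
          rw [hk]; exact pv_fd d k (by omega)
        have hka : k.natAbs ≤ f₁ := by omega
        have hkb : k.natAbs ≤ f₂ := by omega
        simp only [pvFactor, not_le.mpr hn1, if_neg, not_false_eq_true]
        rw [← hd, hfd, ih f₂ k hka hkb]
    

-- fuel independence for the exponent counter
theorem pv_cnt_fuel (f₁ : Nat) : ∀ (f₂ : Nat) (c n : Int), 2 ≤ c → 1 ≤ n →
    n.natAbs ≤ f₁ → n.natAbs ≤ f₂ → pvCnt f₁ 0 c n = pvCnt f₂ 0 c n := by
  induction f₁ with
  | zero => intro f₂ c n _ hn h1 _; omega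
  | succ f₁ ih =>
    intro f₂ c n hc hn h1 h2
    by_cases h : PySem.Int.mod n c = 0
    · rcases (PySem.Int.mod_eq_zero_iff_dvd n c).mp h with ⟨k, hk⟩
      have hfd : PySem.Int.floordiv n c = k := by rw [hk]; exact pv_fd _ _ (by omega)
      have hk1 : 1 ≤ k := by nlinarith
      have hkn : k < n := by nlinarith
      cases f₂ with
      | zero => omega
      | succ f₂ =>
        simp only [pvCnt, h, if_pos, hfd]
        rw [pv_cnt_acc f₁, pv_cnt_acc f₂, ih f₂ c k hc hk1 (by omega) (by omega)]
    · rw [pv_cnt_zero _ _ _ h, pv_cnt_zero _ _ _ h]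

-- peeling all powers of the current candidate off the factor list
theorem pv_factor_peel (F : Nat) : ∀ (c n : Int), 2 ≤ c → (c = 2 ∨ c % 2 = 1) → 1 ≤ n →
    (∀ e : Int, 2 ≤ e → e < c → ¬ e ∣ n) → n.natAbs ≤ F →
    pvFactor F n = List.replicate (pvCnt n.natAbs 0 c n).1.toNat c
      ++ pvFactor ((pvCnt n.natAbs 0 c n).2).natAbs ((pvCnt n.natAbs 0 c n).2) := by
  induction F with
  | zero => intro c n _ _ hn _ hF; omega
  | succ F ih =>
    intro c n hc hsh hn hno hF
    by_cases h : PySem.Int.mod n c = 0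
    · have hcd : c ∣ n := (PySem.Int.mod_eq_zero_iff_dvd n c).mp h
      obtain ⟨k, hk⟩ := hcd
      have hn2 : 2 ≤ n := le_trans hc (Int.le_of_dvd (by omega) ⟨k, hk⟩)
      have hk1 : 1 ≤ k := by nlinarith
      have hkn : k < n := by nlinarith
      have hspf : pvSpf (n.natAbs + 2) 2 n = c := pv_spf_least_eq n c hn2 hc ⟨k, hk⟩ hno
      have hfd : PySem.Int.floordiv n c = k := by rw [hk]; exact pv_fd _ _ (by omega)
      have hfac : pvFactor (F + 1) n = c :: pvFactor F k := by
        simp only [pvFactor, not_le.mpr (by omega : (1:Int) < n), if_neg, not_false_eq_true,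
          hspf, hfd]
      -- unfold one step of the counter
      obtain ⟨m, hm⟩ : ∃ m, n.natAbs = m + 1 := ⟨n.natAbs - 1, by omega⟩
      have hcnt : pvCnt n.natAbs 0 c n
          = (1 + (pvCnt k.natAbs 0 c k).1, (pvCnt k.natAbs 0 c k).2) := by
        rw [hm]
        simp only [pvCnt, h, if_pos, hfd]
        rw [pv_cnt_acc m, pv_cnt_fuel m k.natAbs c k (by omega) hk1 (by omega) (le_refl _)]
        simp
      have hkno : ∀ e : Int, 2 ≤ e → e < c → ¬ e ∣ k := by
        intro e he2 hec hedvd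
        exact hno e he2 hec (dvd_trans hedvd ⟨c, by rw [hk]; ring⟩)
      have hih := ih c k hc hsh hk1 hkno (by omega)
      rw [hfac, hih, hcnt]
      have hnn := pv_cnt_nonneg k.natAbs c k
      have : (1 + (pvCnt k.natAbs 0 c k).1).toNat = (pvCnt k.natAbs 0 c k).1.toNat + 1 := by
        omega
      rw [this, List.replicate_succ]
      simp
    · rw [pv_cnt_zero _ _ _ h]
      simp only [Int.toNat_zero, List.replicate_zero, List.nil_append]
      exact pv_factor_fuel (F + 1) n.natAbs n hF (le_refl _)

-- when c*c > n and nothing below c divides n, the factor list is just [n] (or [] for n = 1)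
theorem pv_factor_residual (n c : Int) (hn : 1 ≤ n) (hc : 2 ≤ c)
    (hno : ∀ e : Int, 2 ≤ e → e < c → ¬ e ∣ n) (hcc : n < c * c) :
    pvFactor n.natAbs n = if 1 < n then [n] else [] := by
  by_cases hn1 : 1 < n
  · obtain ⟨m, hm⟩ : ∃ m, n.natAbs = m + 1 := ⟨n.natAbs - 1, by omega⟩
    have hspf : pvSpf (n.natAbs + 2) 2 n = n := pv_spf_residual n c (by omega) hc hno hcc
    have hfd : PySem.Int.floordiv n n = 1 := by
      have := pv_fd n 1 (by omega : (0:Int) < n)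
      simpa using this
    have hm1 : 1 ≤ m := by omega
    obtain ⟨m', hm'⟩ : ∃ m', m = m' + 1 := ⟨m - 1, by omega⟩
    rw [hm]
    simp only [pvFactor, not_le.mpr hn1, if_neg, not_false_eq_true]
    rw [hspf, hfd, hm']
    simp [pvFactor, hn1]
  · have : n = 1 := by omega
    subst this
    simp [pvFactor]

theorem pvSL_shift (l : List Int) : ∀ (a : Int),
    l.foldl (fun acc p => if 3 < p then acc + (p - 1) else acc) a = a + pvSL l := by
  induction l with
  | nil => intro a; simp [pvSL]
  | cons x xs ih =>
    intro a
    simp only [pvSL, List.foldl_cons]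
    rw [ih, ih (if 3 < x then 0 + (x - 1) else 0)]
    split <;> ring

theorem pvSL_append (l₁ l₂ : List Int) : pvSL (l₁ ++ l₂) = pvSL l₁ + pvSL l₂ := by
  unfold pvSL
  rw [List.foldl_append, pvSL_shift]
  rfl

theorem pvSL_replicate (k : Nat) (c : Int) :
    pvSL (List.replicate k c) = (k : Int) * (if 3 < c then c - 1 else 0) := by
  induction k with
  | zero => simp [pvSL]
  | succ k ih =>
    rw [List.replicate_succ]
    simp only [pvSL, List.foldl_cons]
    rw [pvSL_shift, ih]
    push_cast
    split <;> ring

-- inserting the residual value n into the dict matches the residual factor list [n]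
theorem pv_residual_step (d : PySem.Dict Int Int) (c n : Int) (hn : 1 ≤ n) (hc : 2 ≤ c)
    (hno : ∀ e : Int, 2 ≤ e → e < c → ¬ e ∣ n)
    (hdisj : ∀ p : Int, d.contains p = true → ¬ p ∣ n) (hcc : n < c * c) :
    ((if 1 < n then d.insert n (d.getD n 0 + 1) else d).getD 2 0
        = d.getD 2 0 + ((pvFactor n.natAbs n).count 2 : Int)) ∧
    ((if 1 < n then d.insert n (d.getD n 0 + 1) else d).getD 3 0
        = d.getD 3 0 + ((pvFactor n.natAbs n).count 3 : Int)) ∧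
    (pvS (if 1 < n then d.insert n (d.getD n 0 + 1) else d)
        = pvS d + pvSL (pvFactor n.natAbs n)) := by
  rw [pv_factor_residual n c hn hc hno hcc]
  by_cases h1 : 1 < n
  · simp only [h1, if_pos]
    have hcontains : d.contains n = false := by
      cases hcf : d.contains n
      · rfl
      · exact absurd (dvd_refl n) (hdisj n hcf)
    have hget : d.getD n 0 = 0 := PySem.Dict.getD_of_not_contains d 0 hcontains
    have hfresh := pvS_insert_fresh d n (d.getD n 0 + 1) hcontains
    refine ⟨?_, ?_, ?_⟩
    · rw [PySem.Dict.getD_insert]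
      by_cases h2 : n = 2
      · subst h2; simp [List.count_cons, hget]
      · simp [Ne.symm h2, h2, List.count_cons, List.count_nil]
    · rw [PySem.Dict.getD_insert]
      by_cases h3 : n = 3
      · subst h3; simp [List.count_cons, hget]
      · simp [Ne.symm h3, h3, List.count_cons, List.count_nil]
    · rw [hfresh, hget]
      have : pvSL [n] = if 3 < n then n - 1 else 0 := by
        simp [pvSL]
      rw [this]
      by_cases hgt : 3 < n
      · have : ¬ (n = 2 ∨ n = 3) := by omega
        simp [this, hgt]
      · have : n = 2 ∨ n = 3 := by omega
        simp [this, hgt]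
  · simp only [h1, if_neg, not_false_eq_true]
    simp [pvSL]

-- the main outer-loop relation: A's dict sweep vs B's factor list
theorem pv_outer_main (f : Nat) : ∀ (c : Int) (d : PySem.Dict Int Int) (n : Int),
    1 ≤ n → 2 ≤ c → (c = 2 ∨ c % 2 = 1) →
    (∀ e : Int, 2 ≤ e → e < c → ¬ e ∣ n) →
    (∀ p : Int, d.contains p = true → ¬ p ∣ n) →
    (n.natAbs : Int) + 2 ≤ (f : Int) + c →
    (let r := pvPfOuter f d c n;
     let dF := if 1 < r.2 then r.1.insert r.2 (r.1.getD r.2 0 + 1) else r.1;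
     dF.getD 2 0 = d.getD 2 0 + ((pvFactor n.natAbs n).count 2 : Int) ∧
     dF.getD 3 0 = d.getD 3 0 + ((pvFactor n.natAbs n).count 3 : Int) ∧
     pvS dF = pvS d + pvSL (pvFactor n.natAbs n)) := by
  induction f with
  | zero =>
    intro c d n hn hc hsh hno hdisj hfc
    simp only [pvPfOuter]
    exact pv_residual_step d c n hn hc hno hdisj
      (by have h1 : n < c := by omega
          nlinarith)
  | succ f ih =>
    intro c d n hn hc hsh hno hdisj hfc
    by_cases hcc : c * c ≤ n
    · -- one outer iteration: divide out all powers of c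
      have hpeel := pv_factor_peel n.natAbs c n hc hsh hn hno (le_refl _)
      have hexit := pv_cnt_exits n.natAbs c n hc hn (le_refl _)
      have hdvd2 := pv_cnt_dvd n.natAbs 0 c n (by omega)
      set e := (pvCnt n.natAbs 0 c n).1 with he
      set n₂ := (pvCnt n.natAbs 0 c n).2 with hn₂
      have henn := pv_cnt_nonneg n.natAbs c n
      have hn₂n : n₂ ≤ n := Int.le_of_dvd (by omega) hdvd2
      have hstep : pvPfOuter (f + 1) d c n
          = pvPfOuter f (pvPfInner n.natAbs d c n).1 (c + (if c = 2 then 1 else 2))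
              (pvPfInner n.natAbs d c n).2 := by
        simp only [pvPfOuter, hcc, if_pos]
      have hinner := pv_inner_rel n.natAbs c n d
      set d' := if e = 0 then d else d.insert c (d.getD c 0 + e) with hd'
      have hinner' : pvPfInner n.natAbs d c n = (d', n₂) := hinner
      -- hypotheses for the IH at the next candidate
      have hc' : 2 ≤ c + (if c = 2 then 1 else 2) := by split <;> omega
      have hsh' : c + (if c = 2 then 1 else 2) = 2 ∨ (c + (if c = 2 then 1 else 2)) % 2 = 1 := by
        rcases hsh with h2 | hodd
        · subst h2; right; norm_num
        · right
          have hc2 : ¬ c = 2 := by omega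
          simp only [hc2, if_neg, not_false_eq_true]
          omega
      have hnoc : ¬ c ∣ n₂ := fun hcd =>
        hexit.1 ((PySem.Int.mod_eq_zero_iff_dvd n₂ c).mpr hcd)
      have hno' : ∀ e' : Int, 2 ≤ e' → e' < c + (if c = 2 then 1 else 2) → ¬ e' ∣ n₂ := by
        intro e' he2 hec hedvd
        by_cases hec' : e' < c
        · exact hno e' he2 hec' (dvd_trans hedvd hdvd2)
        · by_cases hee : e' = c
          · exact hnoc (hee ▸ hedvd)
          · have hc2 : ¬ c = 2 := by
              intro h2; subst h2; simp at hec; omega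
            simp only [hc2, if_neg, not_false_eq_true] at hec
            have h2e : (2 : Int) ∣ e' := by omega
            have h2n : (2 : Int) ∣ n := dvd_trans (dvd_trans h2e hedvd) hdvd2
            exact hno 2 (by norm_num) (by omega) h2n
      have hdisj' : ∀ p : Int, d'.contains p = true → ¬ p ∣ n₂ := by
        intro p hp
        rw [hd'] at hp
        by_cases hz : e = 0
        · simp only [hz, if_pos] at hp
          exact fun hdp => hdisj p hp (dvd_trans hdp hdvd2)
        · simp only [hz, if_neg, not_false_eq_true] at hp
          rw [PySem.Dict.contains_insert] at hp
          rcases Bool.or_eq_true_iff.mp hp with hpc | hpd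
          · have : p = c := by simpa using hpc
            exact this ▸ hnoc
          · exact fun hdp => hdisj p hpd (dvd_trans hdp hdvd2)
      have hfc' : (n₂.natAbs : Int) + 2 ≤ (f : Int) + (c + (if c = 2 then 1 else 2)) := by
        have : n₂.natAbs ≤ n.natAbs := by omega
        split <;> omega
      have hih := ih (c + (if c = 2 then 1 else 2)) d' n₂ hexit.2 hc' hsh' hno' hdisj' hfc'
      simp only at hih
      rw [hstep, hinner']
      simp only at hih ⊢
      obtain ⟨hih2, hih3, hihS⟩ := hih
      rw [hih2, hih3, hihS, hpeel]
      -- relate d' to d and the replicate block to the counts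
      have hfresh : e ≠ 0 → d.contains c = false := by
        intro hz
        cases hcf : d.contains c
        · rfl
        · exact absurd ((PySem.Int.mod_eq_zero_iff_dvd n c).mp (pv_cnt_pos_mod _ _ _ hz))
            (hdisj c hcf)
      have hget2 : d'.getD 2 0 = d.getD 2 0 + (if c = 2 then e else 0) := by
        rw [hd']
        by_cases hz : e = 0
        · simp [hz]
        · have hg : d.getD c 0 = 0 :=
            PySem.Dict.getD_of_not_contains d 0 (hfresh hz)
          simp only [hz, if_neg, not_false_eq_true]
          rw [PySem.Dict.getD_insert]
          by_cases h2 : c = 2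
          · subst h2; simp [hg]
          · simp [h2, Ne.symm h2]
      have hget3 : d'.getD 3 0 = d.getD 3 0 + (if c = 3 then e else 0) := by
        rw [hd']
        by_cases hz : e = 0
        · simp [hz]
        · have hg : d.getD c 0 = 0 :=
            PySem.Dict.getD_of_not_contains d 0 (hfresh hz)
          simp only [hz, if_neg, not_false_eq_true]
          rw [PySem.Dict.getD_insert]
          by_cases h3 : c = 3
          · subst h3; simp [hg]
          · simp [h3, Ne.symm h3]
      have hgetS : pvS d' = pvS d + (if ¬ (c = 2 ∨ c = 3) then e * (c - 1) else 0) := by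
        rw [hd']
        by_cases hz : e = 0
        · simp [hz]
        · have hg : d.getD c 0 = 0 :=
            PySem.Dict.getD_of_not_contains d 0 (hfresh hz)
          simp only [hz, if_neg, not_false_eq_true]
          rw [pvS_insert_fresh d c (d.getD c 0 + e) (hfresh hz), hg]
          split <;> ring_nf
      rw [hget2, hget3, hgetS, pvSL_append, pvSL_replicate]
      simp only [List.count_append, List.count_replicate]
      refine ⟨?_, ?_, ?_⟩
      · by_cases h2 : c = 2
        · subst h2; simp; push_cast; omega
        · have : ¬ ((2:Int) == c) = true := by simp [Ne.symm h2]
          simp [h2, this]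
      · by_cases h3 : c = 3
        · subst h3; simp; push_cast; omega
        · have : ¬ ((3:Int) == c) = true := by simp [Ne.symm h3]
          simp [h3, this]
      · by_cases hgt : 3 < c
        · have : ¬ (c = 2 ∨ c = 3) := by omega
          simp only [this, if_neg, not_false_eq_true, hgt, if_pos]
          have : ((e.toNat : Int)) = e := by omega
          rw [this]
          ring
        · have : c = 2 ∨ c = 3 := by omega
          simp only [this, if_pos, not_true_eq_false, if_false, hgt, if_neg, not_false_eq_true]
          ring_nf
    · simp only [pvPfOuter, hcc, if_neg, not_false_eq_true]
      exact pv_residual_step d c n hn hc hno hdisj (by omega)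

theorem pv_strip_eq (f : Nat) : ∀ (v : Int), pvRpp f v 3 = pvStrip3 f v := by
  induction f with
  | zero => intro v; rfl
  | succ f ih =>
    intro v
    by_cases h : PySem.Int.mod v 3 = 0 <;> simp [pvRpp, pvStrip3, ih]

-- ===== VERDICT (by name: the statement is the Claim_ definition above) =====
theorem predicted_m108t_d18_spec : Claim_equal_predicted_m108t_d18 := by
  intro t _
  unfold Spec_predicted_m108t_d18 predicted_m108t_d18 predicted_m108t_d18_alt
    prime_factorization remove_prime_power
  have hsig : -(6 * t - 1) = 1 - 6 * t := by ring
  by_cases hpos : 1 ≤ t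
  · have hmain := pv_outer_main (t.natAbs + 2) 2 PySem.Dict.empty t hpos (le_refl 2)
      (Or.inl rfl) (fun e he2 hlt _ => by omega)
      (fun p hp => by simp at hp) (by push_cast; omega)
    simp only at hmain
    obtain ⟨h2, h3, hS⟩ := hmain
    have hff : pvFactor (t.natAbs + 1) t = pvFactor t.natAbs t :=
      pv_factor_fuel (t.natAbs + 1) t.natAbs t (by omega) (le_refl _)
    have hE2 : (PySem.Dict.empty : PySem.Dict Int Int).getD 2 0 = 0 := rfl
    have hE3 : (PySem.Dict.empty : PySem.Dict Int Int).getD 3 0 = 0 := rfl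
    have hES : pvS (PySem.Dict.empty : PySem.Dict Int Int) = 0 := rfl
    rw [hE2, zero_add] at h2
    rw [hE3, zero_add] at h3
    rw [hES, zero_add] at hS
    simp only [pvS, pvSL] at hS
    simp only [hsig, pv_strip_eq (t.natAbs + 1) t, hff, h2, h3, hS]
  · have h4 : ¬ ((2:Int) * 2 ≤ t) := by omega
    have houter : pvPfOuter (t.natAbs + 2) PySem.Dict.empty 2 t = (PySem.Dict.empty, t) := by
      show pvPfOuter (t.natAbs + 1 + 1) _ 2 t = _
      simp only [pvPfOuter, if_neg h4]
    have hfac : pvFactor (t.natAbs + 1) t = [] := by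
      simp [pvFactor, show t ≤ 1 by omega]
    have hnt : ¬ (1 < t) := by omega
    simp only [houter, hnt, if_false, hfac, hsig, pv_strip_eq (t.natAbs + 1) t]
    norm_num [show (PySem.Dict.empty : PySem.Dict Int Int).items = [] from rfl]
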